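-- pv_equiv track=rewrite | github.com/Tiln1/Tiln-bot | calceval.py | notting
-- ===== SOURCE A (Python) =====
-- def notting(useless, a):
--     a = abs(a)
--     l = len(bin(a))-2
--     count = 0
--     while(True):
--         if 2**count >= l:
--             l = 2**count
--             break
--         count += 1
--     return int('0b'+'1'*l, 2) - a
-- ===== SOURCE B (Python) =====
-- def notting(useless, a):
--     # closed-form: width = next power of two >= bit length, answer = (2**width - 1) - |a|
--     a = abs(a)
--     l = a.bit_length() or 1
--     width = 1 << (l - 1).bit_length()
--     return (1 << width) - 1 - a
-- ===== Notes on version B (the rewrite author's own statement) =====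
-- stated objective: simpler
-- what changed: Replaced the count-incrementing while-loop that searches for the smallest power of two >= len(bin(a))-2, and the parse of a string of l '1' characters, with a closed-form bit expression: width = 1 << (l-1).bit_length() and result (1 << width) - 1 - abs(a).
import Mathlib
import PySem

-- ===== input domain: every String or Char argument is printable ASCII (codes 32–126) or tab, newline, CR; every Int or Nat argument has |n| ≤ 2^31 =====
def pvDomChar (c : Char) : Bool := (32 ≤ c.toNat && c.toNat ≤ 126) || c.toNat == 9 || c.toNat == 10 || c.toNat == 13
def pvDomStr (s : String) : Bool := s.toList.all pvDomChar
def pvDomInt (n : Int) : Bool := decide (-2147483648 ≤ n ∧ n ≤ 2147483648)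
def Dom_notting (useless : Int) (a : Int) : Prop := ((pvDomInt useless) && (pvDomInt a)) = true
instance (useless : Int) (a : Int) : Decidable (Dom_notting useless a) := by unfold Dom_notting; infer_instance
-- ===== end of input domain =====

-- B replaces A's power-of-two search loop and '1'*l string parse with one closed-form bit expression (objective: simpler).

-- ===== PORT A =====
-- len(bin(n)) - 2 for n ≥ 1 is the number of binary digits, computed digit by digit as bin does
def pyBinLen : Nat → Nat
  | 0 => 0
  | n + 1 => pyBinLen ((n + 1) / 2) + 1
decreasing_by exact Nat.div_lt_self (Nat.succ_pos n) (by decide)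

-- the while(True) loop: increment count until 2**count >= l, then return 2**count
def nottingLoop (l count : Nat) : Nat :=
  if l ≤ 2 ^ count then 2 ^ count else nottingLoop l (count + 1)
termination_by l - count
decreasing_by
  have h1 : count < 2 ^ count := Nat.lt_two_pow_self
  omega

-- int('0b' + '1'*l, 2): value of l binary ones, accumulated digit by digit
def onesVal (l : Nat) : Nat :=
  List.foldl (fun acc _ => 2 * acc + 1) 0 (List.range l)

def notting (useless : Int) (a : Int) : Int :=
  let n := a.natAbs
  let l := if n = 0 then 1 else pyBinLen n
  let w := nottingLoop l 0
  ((onesVal w : Nat) : Int) - (n : Int)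

-- ===== PORT B =====
def notting_alt (useless : Int) (a : Int) : Int :=
  let n := a.natAbs
  let l := if Nat.size n = 0 then 1 else Nat.size n   -- a.bit_length() or 1
  let width := (1 : Nat) <<< Nat.size (l - 1)
  (((1 : Nat) <<< width : Nat) : Int) - 1 - (n : Int)

-- ===== PRECONDITION & SPEC =====
def Spec_notting (useless : Int) (a : Int) (out : Int) : Prop := out = notting_alt useless a
instance (useless : Int) (a : Int) (out : Int) : Decidable (Spec_notting useless a out) := by unfold Spec_notting; infer_instance

-- ===== CLAIM (what is proved, stated in full; the proofs are below) =====
def Claim_equal_notting : Prop := ∀ (useless : Int) (a : Int), Dom_notting useless a → Spec_notting useless a (notting useless a)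

-- ===== LEMMAS AND PROOFS =====

theorem pyBinLen_le_iff : ∀ (n k : Nat), pyBinLen n ≤ k ↔ n < 2 ^ k := by
  intro n
  induction n using Nat.strong_induction_on with
  | _ n ih =>
    intro k
    match n, k with
    | 0, k => simp only [pyBinLen, Nat.zero_le, true_iff]; positivity
    | n + 1, 0 => simp [pyBinLen]
    | n + 1, k + 1 =>
      have h := ih ((n + 1) / 2) (Nat.div_lt_self (Nat.succ_pos n) (by decide)) k
      simp only [pyBinLen, Nat.add_le_add_iff_right, h, pow_succ]
      omega

theorem pyBinLen_eq_size (n : Nat) : pyBinLen n = Nat.size n := by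
  refine Nat.le_antisymm ?_ ?_
  · exact (pyBinLen_le_iff n _).mpr (Nat.lt_size_self n)
  · exact Nat.size_le.mpr ((pyBinLen_le_iff n _).mp le_rfl)

theorem nottingLoop_eq (l count : Nat) (hl : 1 ≤ l) (h : count ≤ Nat.size (l - 1)) :
    nottingLoop l count = 2 ^ Nat.size (l - 1) := by
  unfold nottingLoop
  split
  · rename_i hle
    have hs : Nat.size (l - 1) ≤ count := Nat.size_le.mpr (by omega)
    have : count = Nat.size (l - 1) := le_antisymm h hs
    rw [this]
  · rename_i hgt
    have hlt : 2 ^ count < l := by omega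
    have hcs : count < Nat.size (l - 1) := by
      by_contra hc
      have h1 : l - 1 < 2 ^ Nat.size (l - 1) := Nat.lt_size_self (l - 1)
      have h2 : (2 : Nat) ^ Nat.size (l - 1) ≤ 2 ^ count :=
        Nat.pow_le_pow_right (by decide) (by omega)
      omega
    exact nottingLoop_eq l (count + 1) hl hcs
termination_by Nat.size (l - 1) - count

theorem onesVal_eq (l : Nat) : onesVal l = 2 ^ l - 1 := by
  induction l with
  | zero => rfl
  | succ m ih =>
    unfold onesVal at *
    rw [List.range_succ, List.foldl_append, ih]
    simp only [List.foldl_cons, List.foldl_nil, pow_succ]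
    have : 1 ≤ (2 : Nat) ^ m := Nat.one_le_two_pow
    omega

-- ===== VERDICT (by name: the statement is the Claim_ definition above) =====
theorem notting_spec : Claim_equal_notting := by
  intro useless a _
  unfold Spec_notting notting notting_alt
  simp only [Nat.shiftLeft_eq, one_mul, pyBinLen_eq_size, Nat.size_eq_zero]
  set n := a.natAbs with hn
  set l := if n = 0 then 1 else Nat.size n with hldef
  have hl1 : 1 ≤ l := by
    by_cases h0 : n = 0
    · simp [hldef, h0]
    · simp [hldef, h0]
      have := Nat.size_eq_zero (n := n)
      omega
  rw [nottingLoop_eq l 0 hl1 (Nat.zero_le _), onesVal_eq]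
  have h1 : 1 ≤ (2 : Nat) ^ (2 ^ Nat.size (l - 1)) := Nat.one_le_two_pow
  push_cast [h1]
  ring
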